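-- pv_equiv track=rewrite | github.com/Rutuja20023/parallel-text-processing | demo.py | rule_checker
-- ===== SOURCE A (Python) =====
-- def rule_checker(text):
--     words = text.lower().split()
--
--     positive_words = ["happy", "satisfied", "excellent", "good", "helpful", "recommend"]
--     negative_words = ["unhappy", "poor", "damaged", "delayed", "disappointed", "bad"]
--
--     score = 0
--     for word in words:
--         if word in positive_words:
--             score += 1
--         elif word in negative_words:
--             score -= 1
--
--     if score > 0:
--         category = "Positive Review"
--     elif score < 0:
--         category = "Negative Review"
--     else:
--         category = "Neutral Review"
--
--     return category, score
-- ===== SOURCE B (Python) =====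
-- def rule_checker(text):
--     # Build a frequency table of the text once, then score by scanning the
--     # two fixed vocabularies instead of testing each text word against them.
--     counts = {}
--     for w in text.lower().split():
--         counts[w] = counts.get(w, 0) + 1
--
--     positive_words = ["happy", "satisfied", "excellent", "good", "helpful", "recommend"]
--     negative_words = ["unhappy", "poor", "damaged", "delayed", "disappointed", "bad"]
--
--     score = sum(counts.get(w, 0) for w in positive_words) \
--           - sum(counts.get(w, 0) for w in negative_words)
--
--     if score > 0:
--         category = "Positive Review"
--     elif score < 0:
--         category = "Negative Review"
--     else:
--         category = "Neutral Review"
--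
--     return category, score
-- ===== Notes on version B (the rewrite author's own statement) =====
-- stated objective: alternative
-- what changed: B builds a word-frequency dictionary of the text in one pass and then computes the score by iterating over the two fixed vocabulary lists (sum of counts of positive words minus sum of counts of negative words), instead of A's per-text-word membership tests against the vocabulary lists.
import Mathlib
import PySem

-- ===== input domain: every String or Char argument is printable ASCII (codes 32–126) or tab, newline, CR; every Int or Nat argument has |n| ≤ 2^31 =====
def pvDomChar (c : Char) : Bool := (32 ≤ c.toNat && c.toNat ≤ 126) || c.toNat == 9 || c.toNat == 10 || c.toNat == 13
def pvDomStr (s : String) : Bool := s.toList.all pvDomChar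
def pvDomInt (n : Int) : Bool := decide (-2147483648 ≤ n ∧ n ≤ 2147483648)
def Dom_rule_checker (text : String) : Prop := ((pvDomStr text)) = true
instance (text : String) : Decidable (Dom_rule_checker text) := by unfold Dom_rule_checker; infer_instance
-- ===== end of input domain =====

-- B replaces A's per-text-word vocabulary membership tests by a frequency table of the
-- text built once, scored by a pass over the two fixed vocabulary lists (alternative).

def pvPos : List String := ["happy", "satisfied", "excellent", "good", "helpful", "recommend"]
def pvNeg : List String := ["unhappy", "poor", "damaged", "delayed", "disappointed", "bad"]

-- ===== PORT A =====
def rule_checker (text : String) : String × Int :=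
  let words := PySem.Str.split₀ (PySem.Str.lower text)
  let score := words.foldl (fun score word =>
    if word ∈ pvPos then score + 1
    else if word ∈ pvNeg then score - 1
    else score) (0 : Int)
  let category :=
    if score > 0 then "Positive Review"
    else if score < 0 then "Negative Review"
    else "Neutral Review"
  (category, score)

-- ===== PORT B =====
def rule_checker_alt (text : String) : String × Int :=
  let counts : PySem.Dict String Int :=
    (PySem.Str.split₀ (PySem.Str.lower text)).foldl
      (fun d w => d.insert w (d.getD w 0 + 1)) PySem.Dict.empty
  let score := (pvPos.map (fun w => counts.getD w 0)).sum
             - (pvNeg.map (fun w => counts.getD w 0)).sum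
  let category :=
    if score > 0 then "Positive Review"
    else if score < 0 then "Negative Review"
    else "Neutral Review"
  (category, score)

-- ===== PRECONDITION & SPEC =====
def Spec_rule_checker (text : String) (out : String × Int) : Prop := out = rule_checker_alt text
instance (text : String) (out : String × Int) : Decidable (Spec_rule_checker text out) := by unfold Spec_rule_checker; infer_instance

-- ===== CLAIM (what is proved, stated in full; the proofs are below) =====
def Claim_equal_rule_checker : Prop := ∀ (text : String), Dom_rule_checker text → Spec_rule_checker text (rule_checker text)

-- ===== LEMMAS AND PROOFS =====

-- indicator sum over a nodup vocabulary
theorem pv_ind_sum (x : String) (voc : List String) (hnd : voc.Nodup) :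
    (voc.map (fun w => if w = x then (1 : Int) else 0)).sum = if x ∈ voc then 1 else 0 := by
  induction voc with
  | nil => simp
  | cons v vs ih =>
    simp only [List.nodup_cons] at hnd
    simp only [List.map_cons, List.sum_cons, ih hnd.2, List.mem_cons]
    by_cases h : x = v
    · subst h; simp [hnd.1]
    · have h' : ¬ v = x := fun e => h e.symm
      simp [h, h']

theorem pv_sum_map_add (l : List String) (f g : String → Int) :
    (l.map (fun w => f w + g w)).sum = (l.map f).sum + (l.map g).sum := by
  induction l with
  | nil => simp
  | cons v vs ih => simp [ih]; ring

-- Σ over a nodup vocabulary of per-word counts, stepwise in the text.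
theorem pv_sum_count_cons (voc : List String) (hnd : voc.Nodup) (x : String) (ws : List String) :
    (voc.map (fun w => ((x :: ws).count w : Int))).sum
      = (voc.map (fun w => (ws.count w : Int))).sum + (if x ∈ voc then 1 else 0) := by
  have hmap : voc.map (fun w => ((x :: ws).count w : Int))
      = voc.map (fun w => (ws.count w : Int) + (if w = x then 1 else 0)) := by
    refine List.map_congr_left (fun w _ => ?_)
    rw [List.count_cons]
    by_cases h : w = x
    · simp [h]
    · have h' : ¬ x = w := fun e => h e.symm
      simp [h, h']
  rw [hmap, pv_sum_map_add, pv_ind_sum x voc hnd]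

theorem pv_loop_eq (ws : List String) (s : Int) :
    ws.foldl (fun score word =>
      if word ∈ pvPos then score + 1
      else if word ∈ pvNeg then score - 1
      else score) s
    = s + (pvPos.map (fun w => (ws.count w : Int))).sum
        - (pvNeg.map (fun w => (ws.count w : Int))).sum := by
  induction ws generalizing s with
  | nil => simp
  | cons x ws ih =>
    have hpos := pv_sum_count_cons pvPos (by decide) x ws
    have hneg := pv_sum_count_cons pvNeg (by decide) x ws
    have hdisj : ¬ (x ∈ pvPos ∧ x ∈ pvNeg) := by
      rintro ⟨h1, h2⟩
      fin_cases h1 <;> simp_all [pvNeg]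
    simp only [List.foldl_cons, ih, hpos, hneg]
    by_cases h1 : x ∈ pvPos <;> by_cases h2 : x ∈ pvNeg <;>
      simp [h1, h2] at hdisj ⊢ <;> ring

-- ===== VERDICT (by name: the statement is the Claim_ definition above) =====
theorem rule_checker_spec : Claim_equal_rule_checker := by
  intro text _
  unfold Spec_rule_checker rule_checker rule_checker_alt
  simp only [pv_loop_eq, PySem.Dict.getD_foldl_insert_add_one, PySem.Dict.getD_empty]
  norm_num
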